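-- pv_equiv track=rewrite | github.com/Ublyudok-kun/reversi | convertirJugadas.py | convertir_izquierda
-- ===== SOURCE A (Python) =====
-- def convertir_izquierda(tablero, x, y, xf, yf, turno, dimension):
--     if (y >= 0 and y < dimension):
--         try:
--             # izq
--             if ((x == xf) and (y > yf)):
--                 if ((tablero[x][y-1] == (turno*-1))):
--                     tablero[x][y-1] = turno
--                     convertir_izquierda(tablero, x, y-1, xf, yf, turno, dimension)
--             else:
--                 return tablero
--         except:
--             IndexError
--     return tablero
-- ===== SOURCE B (Python) =====
-- def convertir_izquierda(tablero, x, y, xf, yf, turno, dimension):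
--     # Iterative rewrite: the leftward sweep keeps y in a loop variable instead of the call stack.
--     # Mutates tablero in place, like the original.
--     while 0 <= y < dimension and x == xf and yf < y:
--         try:
--             row = tablero[x]
--             v = row[y - 1]
--         except IndexError:
--             break
--         if v != -turno:
--             break
--         row[y - 1] = turno
--         y -= 1
--     return tablero
-- ===== Notes on version B (the rewrite author's own statement) =====
-- stated objective: idiomatic
-- what changed: The tail recursion is replaced by an explicit while loop that keeps y in a loop variable instead of the call stack (and hoists the break conditions into the loop guard), avoiding Python's recursion depth limit and call overhead.
import Mathlib
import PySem

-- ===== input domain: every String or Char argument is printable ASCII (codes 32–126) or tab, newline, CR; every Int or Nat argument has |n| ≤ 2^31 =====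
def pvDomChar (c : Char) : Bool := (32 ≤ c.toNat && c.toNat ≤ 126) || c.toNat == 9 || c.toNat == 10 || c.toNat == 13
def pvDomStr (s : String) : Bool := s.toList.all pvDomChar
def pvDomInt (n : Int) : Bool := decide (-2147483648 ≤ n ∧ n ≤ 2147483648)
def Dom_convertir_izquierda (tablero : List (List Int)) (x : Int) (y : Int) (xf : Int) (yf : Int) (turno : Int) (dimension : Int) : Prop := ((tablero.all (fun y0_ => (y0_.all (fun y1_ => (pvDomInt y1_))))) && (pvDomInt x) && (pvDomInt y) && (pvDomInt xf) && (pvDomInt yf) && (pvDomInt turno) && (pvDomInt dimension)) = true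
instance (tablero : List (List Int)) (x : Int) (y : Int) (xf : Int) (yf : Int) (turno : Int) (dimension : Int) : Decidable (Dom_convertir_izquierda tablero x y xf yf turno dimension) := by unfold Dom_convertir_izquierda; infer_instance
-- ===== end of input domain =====

-- ===== PORT A =====
-- Header: B replaces A's tail recursion by an explicit while loop (same leftward sweep,
-- y kept in a loop variable); both mutate tablero in place and return it; equivalence is
-- about the returned board.
-- Port of A: literal transliteration of the recursive sweep; tablero[x][y-1] reads/writes
-- use PySem.List.pyGet?/pySetD (Python negative-index wrap; none = the IndexError A's bare
-- except swallows, after which A falls through and returns tablero).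
def convertir_izquierda (tablero : List (List Int)) (x : Int) (y : Int) (xf : Int) (yf : Int) (turno : Int) (dimension : Int) : List (List Int) :=
  if 0 ≤ y ∧ y < dimension then
    if x = xf ∧ y > yf then
      match PySem.List.pyGet? tablero x with
      | none => tablero                                  -- IndexError on tablero[x], swallowed
      | some fila =>
        match PySem.List.pyGet? fila (y - 1) with
        | none => tablero                                -- IndexError on fila[y-1], swallowed
        | some c =>
          if c = turno * -1 then
            convertir_izquierda
              (PySem.List.pySetD tablero x (PySem.List.pySetD fila (y - 1) turno))
              x (y - 1) xf yf turno dimension            -- recursive call; returns the mutated board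
          else tablero
    else tablero                                         -- the explicit 'return tablero' branch
  else tablero
termination_by (y - yf).toNat
decreasing_by simp_all

-- ===== PORT B =====
-- Port of B: the while loop 'while 0 <= y < dimension and x == xf and yf < y' becomes a
-- tail-recursive loop over the state (tablero, y); each break returns tablero.
def convIzqLoop (x : Int) (xf : Int) (yf : Int) (turno : Int) (dimension : Int) (tablero : List (List Int)) (y : Int) : List (List Int) :=
  if 0 ≤ y ∧ y < dimension ∧ x = xf ∧ yf < y then
    match (PySem.List.pyGet? tablero x).bind
            (fun fila => (PySem.List.pyGet? fila (y - 1)).map (fun v => (fila, v))) with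
    | none => tablero                                    -- IndexError → break
    | some (fila, v) =>
      if v ≠ -turno then tablero                         -- wrong colour → break
      else
        convIzqLoop x xf yf turno dimension
          (PySem.List.pySetD tablero x (PySem.List.pySetD fila (y - 1) turno)) (y - 1)
  else tablero
termination_by (y - yf).toNat
decreasing_by simp_all

def convertir_izquierda_alt (tablero : List (List Int)) (x : Int) (y : Int) (xf : Int) (yf : Int) (turno : Int) (dimension : Int) : List (List Int) :=
  convIzqLoop x xf yf turno dimension tablero y

-- ===== PRECONDITION & SPEC =====
def Spec_convertir_izquierda (tablero : List (List Int)) (x : Int) (y : Int) (xf : Int) (yf : Int) (turno : Int) (dimension : Int) (out : List (List Int)) : Prop := out = convertir_izquierda_alt tablero x y xf yf turno dimension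
instance (tablero : List (List Int)) (x : Int) (y : Int) (xf : Int) (yf : Int) (turno : Int) (dimension : Int) (out : List (List Int)) : Decidable (Spec_convertir_izquierda tablero x y xf yf turno dimension out) := by unfold Spec_convertir_izquierda; infer_instance

-- ===== CLAIM (what is proved, stated in full; the proofs are below) =====
def Claim_equal_convertir_izquierda : Prop := ∀ (tablero : List (List Int)) (x : Int) (y : Int) (xf : Int) (yf : Int) (turno : Int) (dimension : Int), Dom_convertir_izquierda tablero x y xf yf turno dimension → Spec_convertir_izquierda tablero x y xf yf turno dimension (convertir_izquierda tablero x y xf yf turno dimension)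

-- ===== LEMMAS AND PROOFS =====
lemma convIzq_eq_loop (x xf yf turno dimension : Int) :
    ∀ (tablero : List (List Int)) (y : Int),
      convertir_izquierda tablero x y xf yf turno dimension
        = convIzqLoop x xf yf turno dimension tablero y := by
  intro tablero y
  fun_induction convertir_izquierda tablero x y xf yf turno dimension
  all_goals rw [convIzqLoop]
  all_goals simp_all

-- ===== VERDICT (by name: the statement is the Claim_ definition above) =====
theorem convertir_izquierda_spec : Claim_equal_convertir_izquierda := by
  intro tablero x y xf yf turno dimension _
  unfold Spec_convertir_izquierda convertir_izquierda_alt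
  exact convIzq_eq_loop x xf yf turno dimension tablero y
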